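-- pv_equiv track=rewrite | github.com/ProofX-core/CollatzX | Pipeline/pipeline.py | split_even
-- ===== SOURCE A (Python) =====
-- def split_even(total, k):
--     """Split total records evenly across k workers."""
--     base, rem = total // k, total % k
--     spans, start = [], 0
--     for i in range(k):
--         c = base + (1 if i < rem else 0)
--         spans.append((start, c))
--         start += c
--     return spans
-- ===== SOURCE B (Python) =====
-- def split_even(total, k):
--     """Split total records evenly across k workers."""
--     base, rem = divmod(total, k)
--     return [(i * base + min(i, rem), base + (1 if i < rem else 0))
--             for i in range(k)]
-- ===== Notes on version B (the rewrite author's own statement) =====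
-- stated objective: alternative
-- what changed: Eliminates the running start accumulator: each span's offset is computed independently by the closed form i*base + min(i, rem), so the body is a stateless comprehension instead of a stateful loop.
import Mathlib
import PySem

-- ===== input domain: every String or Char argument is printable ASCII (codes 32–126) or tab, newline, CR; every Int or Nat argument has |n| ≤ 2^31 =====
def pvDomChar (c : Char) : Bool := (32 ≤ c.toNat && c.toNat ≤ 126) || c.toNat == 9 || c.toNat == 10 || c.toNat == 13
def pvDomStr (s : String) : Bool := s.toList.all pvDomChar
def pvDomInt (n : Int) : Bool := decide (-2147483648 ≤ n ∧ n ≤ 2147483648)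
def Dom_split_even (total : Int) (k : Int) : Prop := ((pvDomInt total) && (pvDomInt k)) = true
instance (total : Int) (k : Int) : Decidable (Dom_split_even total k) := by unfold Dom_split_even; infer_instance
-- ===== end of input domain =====

-- B replaces A's running start accumulator with a closed-form offset i*base + min(i, rem)
-- computed independently per index (alternative decomposition, same cost).

-- ===== PORT A =====
def split_even (total : Int) (k : Int) : List (Int × Int) :=
  let base := PySem.Int.floordiv total k
  let rem := PySem.Int.mod total k
  let st := (PySem.List.pyRange 0 k 1).foldl
    (fun (acc : List (Int × Int) × Int) i =>
      let c := base + (if i < rem then 1 else 0)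
      (acc.1 ++ [(acc.2, c)], acc.2 + c)) ([], 0)
  st.1

-- ===== PORT B =====
def split_even_alt (total : Int) (k : Int) : List (Int × Int) :=
  let base := PySem.Int.floordiv total k
  let rem := PySem.Int.mod total k
  (PySem.List.pyRange 0 k 1).map
    (fun i => (i * base + min i rem, base + (if i < rem then 1 else 0)))

-- ===== PRECONDITION & SPEC =====
-- Python raises ZeroDivisionError when k = 0 (total // k); excluded.
def Pre_split_even (total : Int) (k : Int) : Prop := k ≠ 0
instance (total : Int) (k : Int) : Decidable (Pre_split_even total k) := by unfold Pre_split_even; infer_instance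
def pvWitness_split_even : Int × Int := (10, 3)
def Spec_split_even (total : Int) (k : Int) (out : List (Int × Int)) : Prop := out = split_even_alt total k
instance (total : Int) (k : Int) (out : List (Int × Int)) : Decidable (Spec_split_even total k out) := by unfold Spec_split_even; infer_instance

-- ===== CLAIM (what is proved, stated in full; the proofs are below) =====
def Claim_equal_split_even : Prop := ∀ (total : Int) (k : Int), Dom_split_even total k → Pre_split_even total k → Spec_split_even total k (split_even total k)

-- ===== LEMMAS AND PROOFS =====

-- loop invariant: folding A's body over range(0, m) yields B's map and the start
-- accumulator m*base + min(m, rem), provided 0 ≤ rem.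
theorem split_even_fold_inv (base rem : Int) (hrem : 0 ≤ rem) (m : Nat) :
    (PySem.List.pyRange 0 m 1).foldl
      (fun (acc : List (Int × Int) × Int) i =>
        let c := base + (if i < rem then 1 else 0)
        (acc.1 ++ [(acc.2, c)], acc.2 + c)) ([], 0)
    = ((PySem.List.pyRange 0 m 1).map
        (fun i => (i * base + min i rem, base + (if i < rem then 1 else 0))),
       (m : Int) * base + min (m : Int) rem) := by
  induction m with
  | zero => simp [PySem.List.pyRange_one_eq_nil, min_eq_left hrem]
  | succ n ih =>
    have h : PySem.List.pyRange 0 ((n : Int) + 1) 1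
        = PySem.List.pyRange 0 n 1 ++ [(n : Int)] :=
      PySem.List.pyRange_one_succ_right (by positivity)
    push_cast
    rw [h, List.foldl_append, List.map_append, ih]
    simp only [List.foldl_cons, List.foldl_nil, List.map_cons, List.map_nil]
    refine Prod.ext rfl ?_
    by_cases hn : (n : Int) < rem
    · rw [if_pos hn, min_eq_left (by omega : (n : Int) ≤ rem),
        min_eq_left (by omega : (n : Int) + 1 ≤ rem)]
      ring
    · rw [if_neg hn, min_eq_right (by omega : rem ≤ (n : Int)),
        min_eq_right (by omega : rem ≤ (n : Int) + 1)]
      ring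

-- ===== VERDICT (by name: the statement is the Claim_ definition above) =====
theorem split_even_spec : Claim_equal_split_even := by
  intro total k _ hk
  unfold Spec_split_even split_even split_even_alt
  by_cases hkpos : 0 < k
  · have hrem : 0 ≤ PySem.Int.mod total k := PySem.Int.mod_nonneg total hkpos
    have hkn : ((k.toNat : Int)) = k := Int.toNat_of_nonneg (le_of_lt hkpos)
    have hinv := split_even_fold_inv (PySem.Int.floordiv total k)
      (PySem.Int.mod total k) hrem k.toNat
    rw [hkn] at hinv
    simp only at hinv ⊢
    rw [hinv]
  · rw [PySem.List.pyRange_one_eq_nil (by omega)]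
    simp
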